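-- pv_equiv track=rewrite | github.com/shiva-aditya/codemind-python | Decimal_to_inbase.py | po
-- ===== SOURCE A (Python) =====
-- def po(n,b):
--     s=[]
--     while n:
--         t=n%b
--         n=n//b
--         s.append(t)
--     m=0
--     c=0
--     for i in s:
--         if (i==0):
--             c+=1
--         else:
--             if (c>m):
--                 m=c
--             c=0
--     if (m==0):
--         return -1
--     else :
--         return m
-- ===== SOURCE B (Python) =====
-- def po(n, b):
--     # fused: compute digits and scan the zero-run in one loop, no list
--     m = 0
--     c = 0
--     while n:
--         if n % b == 0:
--             c += 1
--         else:
--             if c > m: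
--                 m = c
--             c = 0
--         n //= b
--     return -1 if m == 0 else m
-- ===== Notes on version B (the rewrite author's own statement) =====
-- stated objective: simpler
-- what changed: B fuses digit extraction and zero-run scanning into a single loop carrying a running count and maximum, never building the digit list A constructs and re-scans.
import Mathlib
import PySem

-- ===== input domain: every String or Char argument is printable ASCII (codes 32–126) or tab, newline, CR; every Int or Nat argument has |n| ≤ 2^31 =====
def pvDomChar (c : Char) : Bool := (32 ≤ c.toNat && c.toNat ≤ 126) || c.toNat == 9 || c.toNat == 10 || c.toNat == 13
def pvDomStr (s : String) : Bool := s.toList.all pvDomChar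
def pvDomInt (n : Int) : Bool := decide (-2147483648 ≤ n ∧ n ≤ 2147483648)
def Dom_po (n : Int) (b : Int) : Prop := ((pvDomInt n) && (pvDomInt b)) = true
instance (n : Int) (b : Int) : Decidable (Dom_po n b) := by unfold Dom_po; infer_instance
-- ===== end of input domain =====

-- B fuses digit extraction and zero-run scanning into one loop carrying a running count and maximum,
-- never building the digit list A constructs and re-scans (objective: simpler).

-- ===== PORT A =====
-- A's `while n:` digit-extraction loop; the fuel argument is only a totality guard
-- (inside Pre_po the loop runs at most O(log |n|) ≤ 2*|n|+2 iterations, so fuel never runs out).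
def poDigits (fuel : Nat) (n : Int) (b : Int) (s : List Int) : List Int :=
  match fuel with
  | 0 => s
  | fuel + 1 =>
    if n ≠ 0 then
      poDigits fuel (PySem.Int.floordiv n b) b (s ++ [PySem.Int.mod n b])
    else s

-- A's scan: `for i in s:` updating c and m
def poStep (mc : Int × Int) (i : Int) : Int × Int :=
  if i = 0 then (mc.1, mc.2 + 1)
  else ((if mc.2 > mc.1 then mc.2 else mc.1), 0)

def po (n : Int) (b : Int) : Int :=
  let s := poDigits (2 * n.natAbs + 2) n b []
  let mc := s.foldl poStep (0, 0)
  if mc.1 = 0 then -1 else mc.1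

-- ===== PORT B =====
-- B's single fused `while n:` loop carrying (m, c); same fuel totality guard.
def poAltLoop (fuel : Nat) (n : Int) (b : Int) (m : Int) (c : Int) : Int × Int :=
  match fuel with
  | 0 => (m, c)
  | fuel + 1 =>
    if n ≠ 0 then
      if PySem.Int.mod n b = 0 then
        poAltLoop fuel (PySem.Int.floordiv n b) b m (c + 1)
      else
        poAltLoop fuel (PySem.Int.floordiv n b) b (if c > m then c else m) 0
    else (m, c)

def po_alt (n : Int) (b : Int) : Int :=
  let mc := poAltLoop (2 * n.natAbs + 2) n b 0 0
  if mc.1 = 0 then -1 else mc.1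

-- ===== PRECONDITION & SPEC =====
-- Pre_po is exactly where Python A returns: it raises ZeroDivisionError for b = 0, n ≠ 0,
-- and loops forever for b ∈ {-1, 1} with n ≠ 0 and for n < 0 with b ≥ 2.
def Pre_po (n : Int) (b : Int) : Prop := (0 ≤ n ∧ 2 ≤ b) ∨ b ≤ -2 ∨ n = 0
instance (n : Int) (b : Int) : Decidable (Pre_po n b) := by unfold Pre_po; infer_instance
def pvWitness_po : Int × Int := (8, 2)

def Spec_po (n : Int) (b : Int) (out : Int) : Prop := out = po_alt n b
instance (n : Int) (b : Int) (out : Int) : Decidable (Spec_po n b out) := by unfold Spec_po; infer_instance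

-- ===== CLAIM (what is proved, stated in full; the proofs are below) =====
def Claim_equal_po : Prop := ∀ (n : Int) (b : Int), Dom_po n b → Pre_po n b → Spec_po n b (po n b)

-- ===== LEMMAS AND PROOFS =====

-- A's accumulator list only grows on the right.
theorem poDigits_append (fuel : Nat) (n b : Int) (s : List Int) :
    poDigits fuel n b s = s ++ poDigits fuel n b [] := by
  induction fuel generalizing n s with
  | zero => simp [poDigits]
  | succ fuel ih =>
    simp only [poDigits]
    split
    · rw [ih _ (s ++ [PySem.Int.mod n b]), ih _ ([] ++ [PySem.Int.mod n b])]
      simp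
    · simp

-- Fusion invariant: B's loop computes exactly A's scan of A's digit list, from any state.
theorem poAltLoop_eq_foldl (fuel : Nat) (n b m c : Int) :
    poAltLoop fuel n b m c = (poDigits fuel n b []).foldl poStep (m, c) := by
  induction fuel generalizing n m c with
  | zero => simp [poAltLoop, poDigits]
  | succ fuel ih =>
    simp only [poAltLoop, poDigits]
    split
    · rw [poDigits_append]
      simp only [List.nil_append]
      by_cases h0 : PySem.Int.mod n b = 0
      · simp [h0, poStep, ih]
      · simp [h0, poStep, ih]
    · simp

-- ===== VERDICT (by name: the statement is the Claim_ definition above) =====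
theorem po_spec : Claim_equal_po := by
  intro n b _ _
  unfold Spec_po po po_alt
  rw [poAltLoop_eq_foldl]
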